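-- pv_equiv track=rewrite | github.com/dipenduadhikari13-byte/ai-music-maker | pages/9_✂️_PDF_Splitter.py | split_into_n_equal_parts
-- ===== SOURCE A (Python) =====
-- def split_into_n_equal_parts(total_pages: int, n: int) -> list[list[int]]:
--     """Split into N roughly equal parts."""
--     if n < 1:
--         raise ValueError("Number of parts must be at least 1.")
--     if n > total_pages:
--         n = total_pages
--     base_size = total_pages // n
--     remainder = total_pages % n
--     ranges = []
--     start = 0
--     for i in range(n):
--         size = base_size + (1 if i < remainder else 0)
--         ranges.append(list(range(start, start + size)))
--         start += size
--     return ranges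
-- ===== SOURCE B (Python) =====
-- def split_into_n_equal_parts(total_pages: int, n: int) -> list[list[int]]:
--     """Split into N roughly equal parts, each part computed independently
--     from the closed-form offset i*base + min(i, remainder)."""
--     if n < 1:
--         raise ValueError("Number of parts must be at least 1.")
--     if n > total_pages:
--         n = total_pages
--     base, rem = divmod(total_pages, n)
--     return [list(range(i * base + min(i, rem), (i + 1) * base + min(i + 1, rem)))
--             for i in range(n)]
-- ===== Notes on version B (the rewrite author's own statement) =====
-- stated objective: alternative
-- what changed: Replaces A's sequential accumulator loop (running start updated each iteration, list appended to) by a stateless comprehension that computes each part independently from the closed-form offset i*base + min(i, remainder).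
import Mathlib
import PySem

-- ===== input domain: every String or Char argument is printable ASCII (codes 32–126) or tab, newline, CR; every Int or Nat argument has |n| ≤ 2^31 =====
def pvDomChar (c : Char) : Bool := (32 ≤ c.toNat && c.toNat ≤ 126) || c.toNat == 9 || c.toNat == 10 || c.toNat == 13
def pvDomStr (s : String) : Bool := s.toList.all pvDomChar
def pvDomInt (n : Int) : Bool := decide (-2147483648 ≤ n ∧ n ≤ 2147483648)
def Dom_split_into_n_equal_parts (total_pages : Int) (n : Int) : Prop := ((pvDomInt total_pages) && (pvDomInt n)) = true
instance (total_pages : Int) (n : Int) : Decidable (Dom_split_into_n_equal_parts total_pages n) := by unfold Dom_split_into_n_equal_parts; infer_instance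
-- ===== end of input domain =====

-- B replaces A's accumulator loop (running start, append per iteration) by computing each part
-- independently from the closed-form offset i*base + min(i, remainder) (objective: alternative).


-- ===== PORT A =====
def split_into_n_equal_parts (total_pages : Int) (n : Int) : List (List Int) :=
  if n < 1 then []  -- Python: raise ValueError (excluded by Pre_)
  else
    let n' := if n > total_pages then total_pages else n
    let base_size := PySem.Int.floordiv total_pages n'   -- ZeroDivisionError when n' = 0 (excluded by Pre_)
    let remainder := PySem.Int.mod total_pages n'
    ((PySem.List.pyRange 0 n' 1).foldl
      (fun (st : List (List Int) × Int) i =>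
        let size := base_size + (if i < remainder then 1 else 0)
        (st.1 ++ [PySem.List.pyRange st.2 (st.2 + size) 1], st.2 + size))
      ([], 0)).1

-- ===== PORT B =====
def split_into_n_equal_parts_alt (total_pages : Int) (n : Int) : List (List Int) :=
  if n < 1 then []  -- Python: raise ValueError (excluded by Pre_)
  else
    let n' := if n > total_pages then total_pages else n
    let dm := (PySem.Int.floordiv total_pages n', PySem.Int.mod total_pages n')  -- divmod; ZeroDivisionError when n' = 0 (excluded by Pre_)
    (PySem.List.pyRange 0 n' 1).map (fun i =>
      PySem.List.pyRange (i * dm.1 + min i dm.2) ((i + 1) * dm.1 + min (i + 1) dm.2) 1)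

-- ===== PRECONDITION & SPEC =====
-- Pre_ excludes exactly the inputs where Python A raises: n < 1 (ValueError) and
-- total_pages = 0 (after clamping n becomes 0, so total_pages // n raises ZeroDivisionError;
-- B's divmod raises there too).
def Pre_split_into_n_equal_parts (total_pages : Int) (n : Int) : Prop := 1 ≤ n ∧ total_pages ≠ 0
instance (total_pages : Int) (n : Int) : Decidable (Pre_split_into_n_equal_parts total_pages n) := by unfold Pre_split_into_n_equal_parts; infer_instance
def pvWitness_split_into_n_equal_parts : Int × Int := (10, 3)

def Spec_split_into_n_equal_parts (total_pages : Int) (n : Int) (out : List (List Int)) : Prop := out = split_into_n_equal_parts_alt total_pages n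
instance (total_pages : Int) (n : Int) (out : List (List Int)) : Decidable (Spec_split_into_n_equal_parts total_pages n out) := by unfold Spec_split_into_n_equal_parts; infer_instance

-- ===== CLAIM (what is proved, stated in full; the proofs are below) =====
def Claim_equal_split_into_n_equal_parts : Prop := ∀ (total_pages : Int) (n : Int), Dom_split_into_n_equal_parts total_pages n → Pre_split_into_n_equal_parts total_pages n → Spec_split_into_n_equal_parts total_pages n (split_into_n_equal_parts total_pages n)

-- ===== LEMMAS AND PROOFS =====

-- closed-form start offset of part i, and the i-th part itself
def pvOff (base rem i : Int) : Int := i * base + min i rem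
def pvSeg (base rem i : Int) : List Int := PySem.List.pyRange (pvOff base rem i) (pvOff base rem (i + 1)) 1

theorem pvOff_succ (base rem i : Int) :
    pvOff base rem (i + 1) = pvOff base rem i + (base + (if i < rem then 1 else 0)) := by
  unfold pvOff
  have h : (i + 1) * base = i * base + base := by ring
  rw [h, min_def, min_def]
  split_ifs <;> omega

-- A's accumulator fold produces exactly the closed-form parts (with the final start offset)
theorem pvFoldA (base rem : Int) (hrem : 0 ≤ rem) : ∀ (m : Int), 0 ≤ m →
    ((PySem.List.pyRange 0 m 1).foldl
      (fun (st : List (List Int) × Int) i =>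
        let size := base + (if i < rem then 1 else 0)
        (st.1 ++ [PySem.List.pyRange st.2 (st.2 + size) 1], st.2 + size))
      ([], 0))
    = ((PySem.List.pyRange 0 m 1).map (pvSeg base rem), pvOff base rem m) := by
  intro m hm
  induction m, hm using Int.le_induction with
  | base => simp [PySem.List.pyRange_one_eq_nil le_rfl, pvOff, min_eq_left hrem]
  | succ m hm ih =>
    rw [PySem.List.pyRange_one_succ_right hm, List.foldl_append, ih, List.map_append,
        List.foldl_cons, List.foldl_nil]
    refine Prod.ext ?_ ?_
    · simp [pvSeg, pvOff_succ]
    · simp [pvOff_succ]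

-- ===== VERDICT (by name: the statement is the Claim_ definition above) =====
theorem split_into_n_equal_parts_spec : Claim_equal_split_into_n_equal_parts := by
  intro total_pages n _ hpre
  obtain ⟨hn, ht⟩ := hpre
  unfold Spec_split_into_n_equal_parts split_into_n_equal_parts split_into_n_equal_parts_alt
  have hng : ¬ n < 1 := by omega
  rw [if_neg hng, if_neg hng]
  generalize (if n > total_pages then total_pages else n) = N
  dsimp only
  by_cases hpos : 0 < N
  · have hrem : 0 ≤ PySem.Int.mod total_pages N := PySem.Int.mod_nonneg total_pages hpos
    rw [pvFoldA _ _ hrem N (by omega)]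
    exact List.map_congr_left (fun i _ => rfl)
  · rw [PySem.List.pyRange_one_eq_nil (by omega : N ≤ 0)]
    simp
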